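-- pv_equiv track=rewrite | github.com/INGCOM-UNRN/moodle-reorganizer | src/reorganizer/text_utils.py | apply_forward_substitutions
-- ===== SOURCE A (Python) =====
-- def apply_forward_substitutions(text):
--     """Apply forward substitutions (conventional -> fullwidth/special)."""
--     critical_substitutions = {
--         "==": "⩵",
--         "=": "＝",
--         ";": ";",
--         "#": "＃",
--         "{": "｛",
--         "}": "｝",
--         ">": "＞",
--         "<": "＜",
--     }
--
--     if "==" in text:
--         text = text.replace("==", "⩵")
--
--     for conventional, special in critical_substitutions.items():
--         if conventional != "==" and conventional != "=":
--             text = text.replace(conventional, special)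
--
--     text = text.replace("=", "＝")
--
--     return text
-- ===== SOURCE B (Python) =====
-- def apply_forward_substitutions(text):
--     """Apply forward substitutions (conventional -> fullwidth/special).
--
--     Single left-to-right scan instead of eight .replace passes.
--     """
--     single = {";": ";", "#": "＃", "{": "｛", "}": "｝", ">": "＞", "<": "＜", "=": "＝"}
--     out = []
--     i = 0
--     n = len(text)
--     while i < n:
--         ch = text[i]
--         if ch == "=" and i + 1 < n and text[i + 1] == "=":
--             out.append("⩵")
--             i += 2
--         else:
--             out.append(single.get(ch, ch))
--             i += 1
--     return "".join(out)
-- ===== Notes on version B (the rewrite author's own statement) =====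
-- stated objective: alternative
-- what changed: Replaces the chain of eight str.replace passes by one left-to-right character scan that greedily matches '==' and maps single characters through a dict, joining a buffer at the end.
import Mathlib
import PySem

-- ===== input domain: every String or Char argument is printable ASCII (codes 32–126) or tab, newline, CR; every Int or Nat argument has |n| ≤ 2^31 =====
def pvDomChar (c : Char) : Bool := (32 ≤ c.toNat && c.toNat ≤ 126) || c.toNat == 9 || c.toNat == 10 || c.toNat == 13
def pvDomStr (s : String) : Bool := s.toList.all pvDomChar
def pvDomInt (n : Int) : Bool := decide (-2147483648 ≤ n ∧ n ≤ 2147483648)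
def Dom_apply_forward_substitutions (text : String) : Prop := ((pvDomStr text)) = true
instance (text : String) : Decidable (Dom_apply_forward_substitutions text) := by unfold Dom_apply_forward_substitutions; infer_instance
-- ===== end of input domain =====

-- B replaces A's chain of eight str.replace passes by a single left-to-right scan; alternative decomposition, same result.


-- ===== PORT A =====
-- literal transliteration of A: the guarded "==" replace, then the dict loop unrolled in
-- insertion order over the keys its condition keeps (";","#","{","}",">","<"), then the "=" replace
def apply_forward_substitutions (text : String) : String :=
  let text1 := if PySem.Str.isIn "==" text then PySem.Str.replace text "==" "⩵" else text
  let text2 := PySem.Str.replace text1 ";" ";"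
  let text3 := PySem.Str.replace text2 "#" "＃"
  let text4 := PySem.Str.replace text3 "{" "｛"
  let text5 := PySem.Str.replace text4 "}" "｝"
  let text6 := PySem.Str.replace text5 ">" "＞"
  let text7 := PySem.Str.replace text6 "<" "＜"
  PySem.Str.replace text7 "=" "＝"

-- ===== PORT B =====
-- Source B's `single` dict with its .get default: map a char to its replacement, or itself
def pvMapc (c : Char) : Char :=
  if c = ';' then ';'
  else if c = '#' then '＃'
  else if c = '{' then '｛'
  else if c = '}' then '｝'
  else if c = '>' then '＞'
  else if c = '<' then '＜'
  else if c = '=' then '＝'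
  else c

-- Source B's while loop: consume two chars on a '==' match, else one char through the table
def pvBGo : List Char → List Char
  | [] => []
  | c :: t =>
    if c = '=' ∧ ['='].isPrefixOf t then '⩵' :: pvBGo (t.drop 1)
    else pvMapc c :: pvBGo t
termination_by l => l.length
decreasing_by all_goals (simp; try omega)

def apply_forward_substitutions_alt (text : String) : String :=
  String.ofList (pvBGo text.toList)

-- ===== PRECONDITION & SPEC =====
def Spec_apply_forward_substitutions (text : String) (out : String) : Prop := out = apply_forward_substitutions_alt text
instance (text : String) (out : String) : Decidable (Spec_apply_forward_substitutions text out) := by unfold Spec_apply_forward_substitutions; infer_instance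

-- ===== CLAIM (what is proved, stated in full; the proofs are below) =====
def Claim_equal_apply_forward_substitutions : Prop := ∀ (text : String), Dom_apply_forward_substitutions text → Spec_apply_forward_substitutions text (apply_forward_substitutions text)

-- ===== LEMMAS AND PROOFS =====

-- single-character substitution as a function
def pvRchar (o n c : Char) : Char := if c = o then n else c

-- the "==" → "⩵" pass alone, structurally
def pvRep2 : List Char → List Char
  | [] => []
  | c :: t =>
    if c = '=' ∧ ['='].isPrefixOf t then '⩵' :: pvRep2 (t.drop 1)
    else c :: pvRep2 t
termination_by l => l.length
decreasing_by all_goals (simp; try omega)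

theorem pvPrefix1 (o c : Char) (t : List Char) : ([o].isPrefixOf (c :: t) = true) ↔ c = o := by
  simp only [List.isPrefixOf_iff_prefix, List.cons_prefix_cons]
  constructor
  · rintro ⟨h1, _⟩; exact h1.symm
  · rintro h1; exact ⟨h1.symm, List.nil_prefix⟩

theorem pvPrefix2 (c : Char) (t : List Char) :
    (['=', '='].isPrefixOf (c :: t) = true) ↔ (c = '=' ∧ ['='].isPrefixOf t = true) := by
  simp only [List.isPrefixOf_iff_prefix, List.cons_prefix_cons]
  constructor
  · rintro ⟨h1, h2⟩; exact ⟨h1.symm, h2⟩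
  · rintro ⟨h1, h2⟩; exact ⟨h1.symm, h2⟩

theorem pvGo_cons (old new : List Char) (f : Nat) (c : Char) (t acc : List Char) :
    PySem.Chars.replace.go old new (f + 1) (c :: t) acc =
      if old.isPrefixOf (c :: t) then
        PySem.Chars.replace.go old new f (List.drop old.length (c :: t)) (new.reverse ++ acc)
      else PySem.Chars.replace.go old new f t (c :: acc) := by
  simp [PySem.Chars.replace.go]

theorem pvGo_nil (old new : List Char) (f : Nat) (acc : List Char) :
    PySem.Chars.replace.go old new f [] acc = acc.reverse := by
  cases f <;> simp [PySem.Chars.replace.go]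

theorem pvGo_single (o n : Char) (f : Nat) :
    ∀ (l acc : List Char), l.length ≤ f →
      PySem.Chars.replace.go [o] [n] f l acc = acc.reverse ++ l.map (pvRchar o n) := by
  induction f with
  | zero =>
    intro l acc h
    have hl : l = [] := List.eq_nil_of_length_eq_zero (Nat.le_zero.mp h)
    subst hl; simp [pvGo_nil]
  | succ f ih =>
    intro l acc h
    cases l with
    | nil => simp [pvGo_nil]
    | cons c t =>
      rw [pvGo_cons]
      simp only [List.length_cons] at h
      have hd : List.drop ([o] : List Char).length (c :: t) = t := rfl
      have ha : ([n] : List Char).reverse ++ acc = n :: acc := rfl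
      by_cases hc : c = o
      · rw [if_pos ((pvPrefix1 o c t).mpr hc), hd, ha, ih t (n :: acc) (by omega)]
        subst hc; simp [pvRchar]
      · rw [if_neg (fun hpre => hc ((pvPrefix1 o c t).mp hpre)), ih t (c :: acc) (by omega)]
        simp [pvRchar, hc]

theorem pvRep2_cons_pos (c : Char) (t : List Char) (hg : c = '=' ∧ ['='].isPrefixOf t) :
    pvRep2 (c :: t) = '⩵' :: pvRep2 (t.drop 1) := by
  rw [pvRep2]; rw [if_pos hg]

theorem pvRep2_cons_neg (c : Char) (t : List Char) (hg : ¬ (c = '=' ∧ ['='].isPrefixOf t)) :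
    pvRep2 (c :: t) = c :: pvRep2 t := by
  rw [pvRep2]; rw [if_neg hg]

theorem pvGo_pair (f : Nat) :
    ∀ (l acc : List Char), l.length ≤ f →
      PySem.Chars.replace.go ['=', '='] ['⩵'] f l acc = acc.reverse ++ pvRep2 l := by
  induction f with
  | zero =>
    intro l acc h
    have hl : l = [] := List.eq_nil_of_length_eq_zero (Nat.le_zero.mp h)
    subst hl; simp [pvGo_nil, pvRep2]
  | succ f ih =>
    intro l acc h
    cases l with
    | nil => simp [pvGo_nil, pvRep2]
    | cons c t =>
      rw [pvGo_cons]
      simp only [List.length_cons] at h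
      have hd : List.drop (['=', '='] : List Char).length (c :: t) = t.drop 1 := rfl
      have ha : (['⩵'] : List Char).reverse ++ acc = '⩵' :: acc := rfl
      by_cases hg : c = '=' ∧ ['='].isPrefixOf t = true
      · rw [if_pos ((pvPrefix2 c t).mpr hg), hd, ha,
          ih (t.drop 1) ('⩵' :: acc) (by simp; omega),
          pvRep2_cons_pos c t hg]
        simp
      · rw [if_neg (fun hpre => hg ((pvPrefix2 c t).mp hpre)),
          ih t (c :: acc) (by omega), pvRep2_cons_neg c t hg]
        simp

theorem pvReplace_single (l : List Char) (o n : Char) :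
    PySem.Chars.replace l [o] [n] = l.map (pvRchar o n) := by
  rw [PySem.Chars.replace]
  rw [if_neg (by simp)]
  simpa using pvGo_single o n l.length l [] (le_refl _)

theorem pvReplace_pair (l : List Char) :
    PySem.Chars.replace l ['=', '='] ['⩵'] = pvRep2 l := by
  rw [PySem.Chars.replace]
  rw [if_neg (by simp)]
  simpa using pvGo_pair l.length l [] (le_refl _)

theorem pvRep2_of_not_infix (l : List Char) (h : ¬ ['=', '='] <:+: l) : pvRep2 l = l := by
  induction l with
  | nil => simp [pvRep2]
  | cons c t ih =>
    rw [pvRep2_cons_neg c t (by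
      rintro ⟨hc, hp⟩
      subst hc
      cases t with
      | nil => simp [List.isPrefixOf] at hp
      | cons d t' =>
        have hd : d = '=' := (pvPrefix1 '=' d t').mp hp
        subst hd
        exact h ⟨[], t', by simp⟩)]
    rw [ih (fun h' => h (h'.trans (List.suffix_cons c t).isInfix))]

theorem pvMapc_comp (c : Char) :
    pvRchar '=' '＝' (pvRchar '<' '＜' (pvRchar '>' '＞' (pvRchar '}' '｝'
      (pvRchar '{' '｛' (pvRchar '#' '＃' (pvRchar ';' ';' c)))))) = pvMapc c := by
  by_cases h1 : c = ';'
  · subst h1; decide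
  by_cases h2 : c = '#'
  · subst h2; decide
  by_cases h3 : c = '{'
  · subst h3; decide
  by_cases h4 : c = '}'
  · subst h4; decide
  by_cases h5 : c = '>'
  · subst h5; decide
  by_cases h6 : c = '<'
  · subst h6; decide
  by_cases h7 : c = '='
  · subst h7; decide
  simp [pvRchar, pvMapc, h1, h2, h3, h4, h5, h6, h7]

theorem pvMap_rep2 (l : List Char) : (pvRep2 l).map pvMapc = pvBGo l := by
  induction l using pvRep2.induct with
  | case1 => simp [pvRep2, pvBGo]
  | case2 c t hg ih =>
    rw [pvRep2_cons_pos c t hg, pvBGo, if_pos hg]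
    simp only [List.map_cons]
    rw [show pvMapc '⩵' = '⩵' from by decide, ih]
  | case3 c t hg ih =>
    rw [pvRep2_cons_neg c t hg, pvBGo, if_neg hg]
    simp only [List.map_cons]
    rw [ih]

theorem pvChain (l : List Char) :
    ((((((l.map (pvRchar ';' ';')).map (pvRchar '#' '＃')).map (pvRchar '{' '｛')).map
      (pvRchar '}' '｝')).map (pvRchar '>' '＞')).map (pvRchar '<' '＜')).map (pvRchar '=' '＝')
      = l.map pvMapc := by
  simp only [List.map_map]
  apply List.map_congr_left
  intro c _
  simp only [Function.comp_apply]
  exact pvMapc_comp c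

-- ===== VERDICT (by name: the statement is the Claim_ definition above) =====
theorem apply_forward_substitutions_spec : Claim_equal_apply_forward_substitutions := by
  intro text _
  unfold Spec_apply_forward_substitutions
  apply String.toList_inj.mp
  have e2 : ("==" : String).toList = ['=', '='] := rfl
  have eq2 : ("⩵" : String).toList = ['⩵'] := rfl
  have e1 : ("=" : String).toList = ['='] := rfl
  have ea : (";" : String).toList = [';'] := rfl
  have eb : (";" : String).toList = [';'] := rfl
  have ec : ("#" : String).toList = ['#'] := rfl
  have ed : ("＃" : String).toList = ['＃'] := rfl
  have ee : ("{" : String).toList = ['{'] := rfl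
  have ef : ("｛" : String).toList = ['｛'] := rfl
  have eg : ("}" : String).toList = ['}'] := rfl
  have eh : ("｝" : String).toList = ['｝'] := rfl
  have ei : (">" : String).toList = ['>'] := rfl
  have ej : ("＞" : String).toList = ['＞'] := rfl
  have ek : ("<" : String).toList = ['<'] := rfl
  have el : ("＜" : String).toList = ['＜'] := rfl
  have em : ("＝" : String).toList = ['＝'] := rfl
  by_cases h : PySem.Str.isIn "==" text = true
  · simp only [apply_forward_substitutions, apply_forward_substitutions_alt, h, if_true,
      PySem.Str.toList_replace, String.toList_ofList, e2, eq2, e1, ea, ec, ed, ee, ef, eg, eh, ei, ej, ek, el, em]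
    rw [pvReplace_pair]
    rw [pvReplace_single, pvReplace_single, pvReplace_single, pvReplace_single,
      pvReplace_single, pvReplace_single, pvReplace_single]
    rw [pvChain (pvRep2 text.toList), pvMap_rep2]
  · simp only [apply_forward_substitutions, apply_forward_substitutions_alt, h, if_false,
      Bool.false_eq_true, PySem.Str.toList_replace, String.toList_ofList, e1, ea, ec, ed, ee, ef, eg, eh, ei, ej, ek, el, em]
    rw [pvReplace_single, pvReplace_single, pvReplace_single, pvReplace_single,
      pvReplace_single, pvReplace_single, pvReplace_single]
    have hni : ¬ (['=', '='] <:+: text.toList) := by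
      rw [PySem.Str.isIn_eq] at h
      have hf : PySem.Chars.isIn ("==" : String).toList text.toList = false := by
        cases hb : PySem.Chars.isIn ("==" : String).toList text.toList
        · rfl
        · exact absurd hb h
      rw [e2] at hf
      exact (PySem.Chars.isIn_eq_false_iff _ _).mp hf
    rw [pvChain text.toList]
    conv_lhs => rw [← pvRep2_of_not_infix text.toList hni]
    exact pvMap_rep2 text.toList
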